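-- pv_equiv track=rewrite | github.com/Fiyanz/Analisis-Algoritma | greedy/greedyTime.py | find_optimal_order
-- ===== SOURCE A (Python) =====
-- from itertools import permutations
--
-- def calculate_total_time(order, times):
--     T = 0
--     cumulative_time = 0
--     for customer in order:
--         cumulative_time += times[customer - 1]  # Tambah waktu dari pelanggan saat ini
--         T += cumulative_time  # Tambah ke total waktu tunggu
--     return T
--
-- def find_optimal_order(times):
--     customers = [1, 2, 3]
--     all_permutations = list(permutations(customers))  # Semua urutan pelanggan
--     optimal_order = None
--     min_time = float('inf')
--
--     for order in all_permutations:
--         total_time = calculate_total_time(order, times)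
--         if total_time < min_time:
--             min_time = total_time
--             optimal_order = order
--
--     return optimal_order, min_time
-- ===== SOURCE B (Python) =====
-- def find_optimal_order(times):
--     # Greedy: serve customers in ascending time; stable sort keeps ties in
--     # ascending customer order, matching A's lexicographically-first optimum.
--     order = sorted([1, 2, 3], key=lambda c: times[c - 1])
--     total = 0
--     cum = 0
--     for c in order:
--         cum += times[c - 1]
--         total += cum
--     return tuple(order), total
-- ===== Notes on version B (the rewrite author's own statement) =====
-- stated objective: simpler
-- what changed: Replaces the 6-permutation exhaustive search with a greedy stable sort of the customers by service time plus one cumulative pass for the total.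
import Mathlib
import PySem

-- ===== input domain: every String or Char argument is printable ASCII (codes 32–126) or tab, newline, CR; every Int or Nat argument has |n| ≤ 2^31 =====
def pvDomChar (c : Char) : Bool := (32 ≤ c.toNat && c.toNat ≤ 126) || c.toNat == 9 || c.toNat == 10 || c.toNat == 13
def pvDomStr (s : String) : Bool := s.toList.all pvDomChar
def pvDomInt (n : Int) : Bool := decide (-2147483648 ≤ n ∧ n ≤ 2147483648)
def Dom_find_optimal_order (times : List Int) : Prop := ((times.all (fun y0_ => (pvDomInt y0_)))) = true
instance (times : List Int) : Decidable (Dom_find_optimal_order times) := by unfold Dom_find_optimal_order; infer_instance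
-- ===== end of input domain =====

-- B replaces A's 6-permutation exhaustive search with a stable sort of the customers by
-- service time plus one cumulative pass (objective: simpler).


-- ===== PORT A =====
-- helper calculate_total_time(order, times); times[customer-1] is in range under Pre_, ported with pyGetD
def calculate_total_time (order : List Int) (times : List Int) : Int :=
  (order.foldl (fun (s : Int × Int) customer =>
      let cumulative_time := s.2 + PySem.List.pyGetD times (customer - 1) 0
      (s.1 + cumulative_time, cumulative_time)) (0, 0)).1

-- optimal_order = None and min_time = float('inf') are the Option `none`s; 'total_time < min_time'
-- is `s.2.all (total_time < ·)`, true when min_time is still inf.  The final .getD defaults are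
-- unreachable: the permutation list is nonempty, so the loop always sets both components.
def find_optimal_order (times : List Int) : List Int × Int :=
  let customers : List Int := [1, 2, 3]
  let all_permutations := PySem.List.permutations customers 3
  let st := all_permutations.foldl
    (fun (s : Option (List Int) × Option Int) order =>
      let total_time := calculate_total_time order times
      if s.2.all (fun m => total_time < m) then (some order, some total_time) else s)
    (none, none)
  (st.1.getD [], st.2.getD 0)

-- ===== PORT B =====
def find_optimal_order_alt (times : List Int) : List Int × Int :=
  let order := PySem.List.sorted ([1, 2, 3] : List Int)
      (fun c => PySem.List.pyGetD times (c - 1) 0)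
  let st := order.foldl (fun (s : Int × Int) c =>
      let cum := s.2 + PySem.List.pyGetD times (c - 1) 0
      (s.1 + cum, cum)) (0, 0)
  (order, st.1)

-- ===== PRECONDITION & SPEC =====
-- Both programs read times[0], times[1], times[2]; Python raises IndexError on fewer than 3 elements.
def Pre_find_optimal_order (times : List Int) : Prop := 3 ≤ times.length
instance (times : List Int) : Decidable (Pre_find_optimal_order times) := by unfold Pre_find_optimal_order; infer_instance
def pvWitness_find_optimal_order : List Int := [4, 1, 3]

def Spec_find_optimal_order (times : List Int) (out : List Int × Int) : Prop := out = find_optimal_order_alt times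
instance (times : List Int) (out : List Int × Int) : Decidable (Spec_find_optimal_order times out) := by unfold Spec_find_optimal_order; infer_instance

-- ===== CLAIM (what is proved, stated in full; the proofs are below) =====
def Claim_equal_find_optimal_order : Prop := ∀ (times : List Int), Dom_find_optimal_order times → Pre_find_optimal_order times → Spec_find_optimal_order times (find_optimal_order times)

-- ===== LEMMAS AND PROOFS =====
theorem gd0 (x y z : Int) (r : List Int) : PySem.List.pyGetD (x :: y :: z :: r) 0 0 = x := by norm_num [pysem]
theorem gd1 (x y z : Int) (r : List Int) : PySem.List.pyGetD (x :: y :: z :: r) 1 0 = y := by norm_num [pysem]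
theorem gd2 (x y z : Int) (r : List Int) : PySem.List.pyGetD (x :: y :: z :: r) 2 0 = z := by norm_num [pysem]

set_option maxHeartbeats 8000000 in
set_option maxRecDepth 8192 in
theorem find_optimal_order_key (a b c : Int) (rest : List Int) :
    find_optimal_order (a :: b :: c :: rest) = find_optimal_order_alt (a :: b :: c :: rest) := by
  have hp : PySem.List.permutations ([1,2,3]:List Int) 3
      = [[1,2,3],[1,3,2],[2,1,3],[2,3,1],[3,1,2],[3,2,1]] := by decide
  simp only [find_optimal_order, find_optimal_order_alt, calculate_total_time, hp,
    PySem.List.sorted, PySem.List.insertBy, List.foldl]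
  norm_num [pysem, gd0, gd1, gd2]
  set T1 := a + (a + b) + (a + b + c) with hT1
  set T2 := a + (a + c) + (a + c + b) with hT2
  set T3 := b + (b + a) + (b + a + c) with hT3
  set T4 := b + (b + c) + (b + c + a) with hT4
  set T5 := c + (c + a) + (c + a + b) with hT5
  set T6 := c + (c + b) + (c + b + a) with hT6
  split_ifs <;> simp_all
  all_goals
    first
      | omega
      | (norm_num [PySem.List.insertBy, pysem, gd0, gd1, gd2] <;> (try split_ifs) <;>
          simp_all [PySem.List.insertBy, gd0, gd1, gd2] <;> omega)

-- ===== VERDICT (by name: the statement is the Claim_ definition above) =====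
theorem find_optimal_order_spec : Claim_equal_find_optimal_order := by
  intro times _ hpre
  unfold Spec_find_optimal_order
  match times, hpre with
  | a :: b :: c :: rest, _ => exact find_optimal_order_key a b c rest
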